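-- pv_equiv track=rewrite | github.com/pypi-data/pypi-mirror-176 | packages/zut/zut-0.5.1-py3-none-any.whl/zut/format.py | format_description_text
-- ===== SOURCE A (Python) =====
-- def format_description_text(docstring: str):
--     if docstring is None:
--         return None
--
--     description = None
--     indent_size = 0
--
--     for line in docstring.splitlines(keepends=False):
--         if description:
--             description += '\n' + line[indent_size:]
--         else:
--             indent_size = 0
--             for char in line:
--                 if char not in [' ', '\t']:
--                     description = line[indent_size:]
--                     break
--                 else:
--                     indent_size += 1
--
--     return description
-- ===== SOURCE B (Python) =====
-- def format_description_text(docstring: str):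
--     if docstring is None:
--         return None
--     s = docstring.replace('\r\n', '\n').replace('\r', '\n')
--     n = len(s)
--     i = 0
--     col = 0
--     # consume the blank prefix (spaces/tabs/newlines), tracking the current column
--     while i < n and (s[i] == ' ' or s[i] == '\t' or s[i] == '\n'):
--         col = 0 if s[i] == '\n' else col + 1
--         i += 1
--     if i == n:
--         return None
--     # stream the rest, skipping up to `col` characters after every newline
--     out = []
--     while i < n:
--         c = s[i]
--         out.append(c)
--         i += 1
--         if c == '\n':
--             j = 0
--             while j < col and i < n and s[i] != '\n':
--                 i += 1
--                 j += 1
--     result = ''.join(out)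
--     if s.endswith('\n'):
--         result = result[:-1]
--     return result
-- ===== Notes on version B (the rewrite author's own statement) =====
-- stated objective: alternative
-- what changed: Replaces A's line-based stateful fold (splitlines into line strings, per-line char scan for the indent, newline-joined incremental concatenation) by a char-level streaming pass over the raw string: normalize CR and CRLF line endings to LF, consume the blank prefix while tracking the current column, then copy characters once, skipping up to that many characters after each copied newline, finally trimming the trailing newline if the source ended with one.
import Mathlib
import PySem

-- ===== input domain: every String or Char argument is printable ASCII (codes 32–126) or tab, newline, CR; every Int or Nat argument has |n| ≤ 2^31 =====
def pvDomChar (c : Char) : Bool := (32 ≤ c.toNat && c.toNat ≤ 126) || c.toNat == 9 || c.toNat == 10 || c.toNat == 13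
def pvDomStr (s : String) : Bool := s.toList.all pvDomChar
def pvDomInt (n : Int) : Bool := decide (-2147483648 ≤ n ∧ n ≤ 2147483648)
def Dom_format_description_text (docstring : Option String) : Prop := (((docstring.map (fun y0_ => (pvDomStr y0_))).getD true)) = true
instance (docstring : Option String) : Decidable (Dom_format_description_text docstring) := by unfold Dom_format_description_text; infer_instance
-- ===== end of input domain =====

-- B replaces A's line-based stateful fold (splitlines, per-line char scan, joined
-- concatenation) by a char-level streaming pass over the raw string: normalize CR/CRLF
-- line endings, consume the blank prefix tracking the column, then copy characters,
-- skipping up to `col` characters after each copied newline; objective: alternative.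

-- ===== PORT A =====

-- inner loop: `for char in line: if char not in [' ','\t']: … break else indent_size += 1`;
-- returns the break index (first non-space/tab char), none if the loop runs off the line
def pvAScan : List Char → Nat → Option Nat
  | [], _ => none
  | c :: rest, i => if ¬ (c = ' ' ∨ c = '\t') then some i else pvAScan rest (i + 1)

-- one iteration of A's `for line in docstring.splitlines()` loop over state (description, indent_size);
-- `line[indent_size:]` with indent_size ≥ 0 is exactly List.drop
def pvAStep (st : Option (List Char) × Nat) (line : List Char) : Option (List Char) × Nat :=
  match st.1 with
  | some s =>
    if s ≠ [] then (some (s ++ '\n' :: line.drop st.2), st.2)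
    else
      match pvAScan line 0 with
      | some i => (some (line.drop i), i)
      | none => (st.1, line.length)
  | none =>
    match pvAScan line 0 with
    | some i => (some (line.drop i), i)
    | none => (st.1, line.length)

def format_description_text (docstring : Option String) : Option String :=
  match docstring with
  | none => none
  | some d =>
    let st := (PySem.Chars.splitlines d.toList).foldl pvAStep (none, 0)
    st.1.map String.ofList

-- ===== PORT B =====

-- s.replace('\r\n', '\n').replace('\r', '\n')
def pvBNormalize (s : List Char) : List Char :=
  PySem.Chars.replace (PySem.Chars.replace s ['\r', '\n'] ['\n']) ['\r'] ['\n']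

-- the first while loop: consume the blank prefix (spaces/tabs/newlines), tracking the column
def pvBLead : List Char → Nat → List Char × Nat
  | [], col => ([], col)
  | c :: rest, col =>
    if c = ' ' ∨ c = '\t' ∨ c = '\n' then pvBLead rest (if c = '\n' then 0 else col + 1)
    else (c :: rest, col)

-- the inner skip loop: `while j < col and i < n and s[i] != '\n': i += 1; j += 1`
def pvBSkip : Nat → List Char → List Char
  | 0, s => s
  | _ + 1, [] => []
  | j + 1, c :: rest => if c = '\n' then c :: rest else pvBSkip j rest

-- needed by pvBWalk's termination proof (cited in its decreasing_by)
theorem pvBSkip_length (n : Nat) (l : List Char) : (pvBSkip n l).length ≤ l.length := by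
  induction n generalizing l with
  | zero => simp [pvBSkip]
  | succ n ih =>
    cases l with
    | nil => simp [pvBSkip]
    | cons c rest =>
      simp only [pvBSkip]
      split
      · simp
      · exact (ih rest).trans (by simp)

-- the main while loop: copy each char; after a copied '\n' skip up to col chars of the line
def pvBWalk (col : Nat) : List Char → List Char
  | [] => []
  | c :: rest =>
    c :: (if c = '\n' then pvBWalk col (pvBSkip col rest) else pvBWalk col rest)
termination_by l => l.length
decreasing_by
  · exact Nat.lt_succ_of_le (pvBSkip_length _ _)
  · simp

def format_description_text_alt (docstring : Option String) : Option String :=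
  match docstring with
  | none => none
  | some d =>
    let s := pvBNormalize d.toList
    match pvBLead s 0 with
    | ([], _) => none
    | (rem, col) =>
      let out := pvBWalk col rem
      -- `result[:-1]` on the join of single chars is List.dropLast (cf. PySem.Str.slice_to_neg_one)
      some (String.ofList (if PySem.Chars.endswith s ['\n'] then out.dropLast else out))

-- ===== PRECONDITION & SPEC =====
def Spec_format_description_text (docstring : Option String) (out : Option String) : Prop := out = format_description_text_alt docstring
instance (docstring : Option String) (out : Option String) : Decidable (Spec_format_description_text docstring out) := by unfold Spec_format_description_text; infer_instance

-- ===== CLAIM (what is proved, stated in full; the proofs are below) =====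
def Claim_equal_format_description_text : Prop := ∀ (docstring : Option String), Dom_format_description_text docstring → Spec_format_description_text docstring (format_description_text docstring)

-- ===== LEMMAS AND PROOFS =====

-- ---- proof-side vocabulary ----

-- line.lstrip(' \t') as a predicate-level helper
def pvStripL (line : List Char) : List Char := line.dropWhile (fun c => c == ' ' || c == '\t')

-- the locate-then-join reading of A: first line with non-blank content fixes the indent
def pvLocJoin : List (List Char) → Option (List Char)
  | [] => none
  | line :: rest =>
    let stripped := pvStripL line
    if stripped ≠ [] then
      let indent := line.length - stripped.length
      some (PySem.Chars.join ['\n'] ((line :: rest).map (fun l => l.drop indent)))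
    else pvLocJoin rest

-- universal-newline normalization, as a plain recursion
def pvNorm : List Char → List Char
  | [] => []
  | '\r' :: '\n' :: t => '\n' :: pvNorm t
  | '\r' :: t => '\n' :: pvNorm t
  | c :: t => c :: pvNorm t

-- the first replace: '\r\n' → '\n'
def pvR1 : List Char → List Char
  | [] => []
  | '\r' :: '\n' :: t => '\n' :: pvR1 t
  | c :: t => c :: pvR1 t

-- split on '\n' with Python splitlines' trailing rule
def pvConsHead (c : Char) : List (List Char) → List (List Char)
  | [] => [[c]]
  | h :: t => (c :: h) :: t

def pvSplit : List Char → List (List Char)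
  | [] => []
  | c :: t => if c = '\n' then [] :: pvSplit t else pvConsHead c (pvSplit t)

-- rebuild a string from its line list plus trailing-newline flag
def pvGlue (r : List Char) : List (List Char) → List (List Char)
  | [] => if r = [] then [] else [r]
  | h :: t => (r ++ h) :: t

-- rebuild a string from its line list plus trailing-newline flag
def pvUnsplitTail (e : Bool) : List (List Char) → List Char
  | [] => if e then ['\n'] else []
  | l :: rest => '\n' :: (l ++ pvUnsplitTail e rest)

def pvUnsplit (e : Bool) : List (List Char) → List Char
  | [] => []
  | l :: rest => l ++ pvUnsplitTail e rest

def pvEndsNl (n : List Char) : Bool := n.getLast? == some '\n'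

def pvTailJoin (col : Nat) : List (List Char) → List Char
  | [] => []
  | l :: rest => '\n' :: (l.drop col ++ pvTailJoin col rest)

-- B's core on the normalized char list
def pvBCore (n : List Char) : Option (List Char) :=
  match pvBLead n 0 with
  | ([], _) => none
  | (rem, col) =>
    some (if pvEndsNl n then (pvBWalk col rem).dropLast else pvBWalk col rem)

-- ---- A-side: A equals locate-then-join over splitlines ----

theorem pvAScan_eq (line : List Char) (i : Nat) :
    pvAScan line i =
      if line.dropWhile (fun c => c == ' ' || c == '\t') = [] then none
      else some (i + (line.takeWhile (fun c => c == ' ' || c == '\t')).length) := by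
  induction line generalizing i with
  | nil => simp [pvAScan]
  | cons c rest ih =>
    by_cases h : c = ' ' ∨ c = '\t'
    · have hb : (c == ' ' || c == '\t') = true := by
        rcases h with h | h <;> simp [h]
      simp [pvAScan, h, hb, ih]
      split
      · rfl
      · simp
        omega
    · have hb : (c == ' ' || c == '\t') = false := by
        simp only [Bool.or_eq_false_iff, beq_eq_false_iff_ne]
        exact ⟨fun h1 => h (Or.inl h1), fun h2 => h (Or.inr h2)⟩
      simp [pvAScan, h, hb]

theorem pvDrop_takeWhile (p : Char → Bool) (line : List Char) :
    line.drop (line.takeWhile p).length = line.dropWhile p := by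
  induction line with
  | nil => simp
  | cons c rest ih =>
    by_cases h : p c = true
    · simp [h, ih]
    · simp [h]

theorem pvTakeWhile_len (p : Char → Bool) (line : List Char) :
    (line.takeWhile p).length = line.length - (line.dropWhile p).length := by
  induction line with
  | nil => simp
  | cons c rest ih =>
    by_cases h : p c = true
    · have hle : (rest.dropWhile p).length ≤ rest.length := List.length_dropWhile_le _ _
      simp [h, ih]
      omega
    · simp [h]

-- once description is a nonempty string, A only appends
theorem pvPhase2 (rest : List (List Char)) (s : List Char) (i : Nat) (hs : s ≠ []) :
    rest.foldl pvAStep (some s, i)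
      = (some (rest.foldl (fun acc l => acc ++ '\n' :: l.drop i) s), i) := by
  induction rest generalizing s with
  | nil => simp
  | cons l rest ih =>
    have h1 : pvAStep (some s, i) l = (some (s ++ '\n' :: l.drop i), i) := by
      simp [pvAStep, hs]
    rw [List.foldl_cons, h1, ih _ (by simp)]
    simp

theorem pvJoin_foldl (rest : List (List Char)) (a : List Char) :
    PySem.Chars.join ['\n'] (a :: rest)
      = rest.foldl (fun acc l => acc ++ '\n' :: l) a := by
  induction rest generalizing a with
  | nil => simp [PySem.Chars.join_singleton]
  | cons q rest ih =>
    rw [PySem.Chars.join_cons_cons, ih]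
    simp

theorem pvMain (lines : List (List Char)) (ind : Nat) :
    (lines.foldl pvAStep (none, ind)).1 = pvLocJoin lines := by
  induction lines generalizing ind with
  | nil => simp [pvLocJoin]
  | cons line rest ih =>
    by_cases hb : line.dropWhile (fun c => c == ' ' || c == '\t') = []
    · have h1 : pvAStep (none, ind) line = (none, line.length) := by
        simp [pvAStep, pvAScan_eq, hb]
      rw [List.foldl_cons, h1, ih]
      simp [pvLocJoin, pvStripL, hb]
    · set k := (line.takeWhile (fun c => c == ' ' || c == '\t')).length with hk
      have h1 : pvAStep (none, ind) line = (some (line.drop k), k) := by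
        simp [pvAStep, pvAScan_eq, hb]
        omega
      have hdk : line.drop k = pvStripL line := by
        rw [hk, pvStripL, pvDrop_takeWhile]
      have hne : line.drop k ≠ [] := by rw [hdk]; exact hb
      rw [List.foldl_cons, h1, pvPhase2 _ _ _ hne]
      have hkind : line.length - (pvStripL line).length = k := by
        rw [hk, pvTakeWhile_len]; rfl
      have hkind' : line.length - (List.dropWhile (fun c => c == ' ' || c == '\t') line).length = k := hkind
      simp only [pvLocJoin, pvStripL, hb, ne_eq, not_false_eq_true, if_pos]
      rw [hkind', List.map_cons, pvJoin_foldl, List.foldl_map]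

-- ---- normalization: the two replaces compute pvNorm ----

theorem pvReplace_r (fuel : Nat) (l acc : List Char) (h : l.length ≤ fuel) :
    PySem.Chars.replace.go ['\r'] ['\n'] fuel l acc
      = acc.reverse ++ l.map (fun c => if c = '\r' then '\n' else c) := by
  induction fuel generalizing l acc with
  | zero =>
    have : l = [] := by cases l <;> simp_all
    simp [this, PySem.Chars.replace.go]
  | succ fuel ih =>
    cases l with
    | nil => simp [PySem.Chars.replace.go]
    | cons c t =>
      by_cases hc : c = '\r'
      · have hp : List.isPrefixOf ['\r'] (c :: t) = true := by simp [hc, List.isPrefixOf]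
        rw [PySem.Chars.replace.go]
        simp only [hp, if_pos]
        rw [ih _ _ (by simp at h ⊢; omega)]
        simp [hc]
      · have hp : List.isPrefixOf ['\r'] (c :: t) = false := by
          simp [List.isPrefixOf]
          exact fun hh => hc (by simpa using hh.symm)
        rw [PySem.Chars.replace.go]
        simp only [hp, Bool.false_eq_true, if_neg, not_false_eq_true]
        rw [ih _ _ (by simp at h ⊢; omega)]
        simp [hc]

theorem pvR1_rn (t : List Char) : pvR1 ('\r' :: '\n' :: t) = '\n' :: pvR1 t := rfl

theorem pvR1_cons (c : Char) (t : List Char) (h : c ≠ '\r' ∨ ∀ t', t ≠ '\n' :: t') :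
    pvR1 (c :: t) = c :: pvR1 t := by
  rw [pvR1.eq_def]
  split
  · simp_all
  · rename_i t' heq
    injection heq with h1 h2
    rcases h with h | h
    · exact absurd h1 h
    · exact absurd h2 (h t')
  · rename_i c' t' hno heq
    injection heq with h1 h2
    subst h1; subst h2
    rfl

theorem pvReplace_rn (fuel : Nat) (l acc : List Char) (h : l.length ≤ fuel) :
    PySem.Chars.replace.go ['\r', '\n'] ['\n'] fuel l acc = acc.reverse ++ pvR1 l := by
  induction fuel generalizing l acc with
  | zero =>
    have : l = [] := by cases l <;> simp_all
    simp [this, PySem.Chars.replace.go, pvR1]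
  | succ fuel ih =>
    cases l with
    | nil => simp [PySem.Chars.replace.go, pvR1]
    | cons c t =>
      by_cases hc : c = '\r' ∧ ∃ t', t = '\n' :: t'
      · obtain ⟨hc1, t', ht⟩ := hc
        subst hc1; subst ht
        have hp : List.isPrefixOf ['\r', '\n'] ('\r' :: '\n' :: t') = true := by
          simp [List.isPrefixOf]
        rw [PySem.Chars.replace.go]
        simp only [hp, if_pos]
        rw [ih _ _ (by simp at h ⊢; omega)]
        simp [pvR1_rn]
      · have hp : List.isPrefixOf ['\r', '\n'] (c :: t) = false := by
          cases t with
          | nil => simp [List.isPrefixOf]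
          | cons a b =>
            simp [List.isPrefixOf]
            intro h1 h2
            exact absurd ⟨h1.symm, b, by rw [h2]⟩ hc
        rw [PySem.Chars.replace.go]
        simp only [hp, Bool.false_eq_true, if_neg, not_false_eq_true]
        rw [ih _ _ (by simp at h ⊢; omega)]
        have : pvR1 (c :: t) = c :: pvR1 t := by
          apply pvR1_cons
          by_cases hcr : c = '\r'
          · right; intro t' ht; exact hc ⟨hcr, t', ht⟩
          · left; exact hcr
        simp [this]

theorem pvNorm_rn (t : List Char) : pvNorm ('\r' :: '\n' :: t) = '\n' :: pvNorm t := rfl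

theorem pvNorm_r (t : List Char) (h : ∀ t', t ≠ '\n' :: t') :
    pvNorm ('\r' :: t) = '\n' :: pvNorm t := by
  rw [pvNorm.eq_def]
  split
  · simp_all
  · rename_i t' heq
    injection heq with h1 h2
    exact absurd h2 (h t')
  · rename_i t' hno heq
    injection heq with h1 h2
    subst h2; rfl
  · rename_i c' t' hno1 hno2 heq
    injection heq with h1 h2
    exact absurd h1.symm hno2

theorem pvNorm_cons (c : Char) (t : List Char) (h : c ≠ '\r') :
    pvNorm (c :: t) = c :: pvNorm t := by
  rw [pvNorm.eq_def]
  split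
  · simp_all
  · rename_i t' heq
    injection heq with h1 h2
    exact absurd h1 h
  · rename_i t' heq
    injection heq with h1 h2
    exact absurd h1 h
  · rename_i c' t' hno1 hno2 heq
    injection heq with h1 h2
    subst h1; subst h2
    rfl

theorem pvR1_map (s : List Char) :
    (pvR1 s).map (fun c => if c = '\r' then '\n' else c) = pvNorm s := by
  induction s using pvR1.induct with
  | case1 => simp [pvR1, pvNorm]
  | case2 t ih => rw [pvR1_rn, pvNorm_rn, List.map_cons, ih]; simp
  | case3 c t hno ih =>
    have hc : pvR1 (c :: t) = c :: pvR1 t := by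
      apply pvR1_cons
      by_cases hcr : c = '\r'
      · right; intro t' ht; exact hno t' hcr ht
      · left; exact hcr
    rw [hc, List.map_cons, ih]
    by_cases hcr : c = '\r'
    · subst hcr
      rw [pvNorm_r t (fun t' ht => hno t' rfl ht)]
      simp
    · rw [pvNorm_cons c t hcr]
      simp [hcr]

theorem pvNormalize_eq (s : List Char) : pvBNormalize s = pvNorm s := by
  unfold pvBNormalize
  rw [PySem.Chars.replace, PySem.Chars.replace]
  simp only [List.isEmpty_cons, Bool.false_eq_true, if_neg, not_false_eq_true]
  rw [pvReplace_rn s.length s [] le_rfl]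
  simp only [List.reverse_nil, List.nil_append]
  rw [pvReplace_r (pvR1 s).length (pvR1 s) [] le_rfl]
  simp only [List.reverse_nil, List.nil_append]
  exact pvR1_map s

theorem pvGlue_nil (r : List Char) (M : List (List Char)) :
    r :: pvGlue [] M = pvGlue r ([] :: M) := by
  cases M <;> simp [pvGlue]

theorem pvGlue_consHead (r : List Char) (c : Char) (L : List (List Char)) :
    pvGlue r (pvConsHead c L) = pvGlue (r ++ [c]) L := by
  cases L <;> simp [pvGlue, pvConsHead]

theorem pvGoCons (isB : Char → Bool) (c : Char) (rest : List Char) (cur : List Char)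
    (acc : List (List Char)) (h : c ≠ '\r' ∨ ∀ r, rest ≠ '\n' :: r) :
    PySem.Chars.splitlines.go isB (c :: rest) cur acc
      = if isB c then PySem.Chars.splitlines.go isB rest [] (cur.reverse :: acc)
        else PySem.Chars.splitlines.go isB rest (c :: cur) acc := by
  rw [PySem.Chars.splitlines.go.eq_def]
  split
  · rename_i heq; exact absurd heq (by simp)
  · rename_i r heq
    injection heq with h1 h2
    rcases h with h | h
    · exact absurd h1 h
    · exact absurd h2 (h r)
  · rename_i c' r hno heq
    injection heq with h1 h2
    subst h1; subst h2
    rfl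

theorem pvGo_inv (isB : Char → Bool) (h10 : isB '\n' = true) (h13 : isB '\r' = true)
    (hOnly : ∀ c, pvDomChar c → isB c = true → c = '\n' ∨ c = '\r')
    (s : List Char) (hs : ∀ c ∈ s, pvDomChar c) (cur : List Char) (acc : List (List Char)) :
    PySem.Chars.splitlines.go isB s cur acc
      = acc.reverse ++ pvGlue cur.reverse (pvSplit (pvNorm s)) := by
  induction s using pvNorm.induct generalizing cur acc with
  | case1 =>
    rw [PySem.Chars.splitlines.go]
    simp only [pvNorm, pvSplit, pvGlue, List.isEmpty_iff]
    split
    · rename_i h; simp [h]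
    · rename_i h; simp [h]
  | case2 t ih =>
    rw [PySem.Chars.splitlines.go]
    rw [ih (fun c hc => hs c (by simp [hc]))]
    rw [pvNorm_rn]
    simp [pvSplit, ← pvGlue_nil]
  | case3 t hno ih =>
    rw [pvGoCons isB '\r' t cur acc (Or.inr fun r hr => hno r hr)]
    rw [h13, if_pos rfl]
    rw [ih (fun c hc => hs c (by simp [hc]))]
    rw [pvNorm_r t (fun t' ht => hno t' ht)]
    simp [pvSplit, ← pvGlue_nil]
  | case4 c t hno1 hno2 ih =>
    rw [pvGoCons isB c t cur acc (Or.inl hno2)]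
    have hdc : pvDomChar c := hs c (by simp)
    rw [pvNorm_cons c t hno2]
    by_cases hcn : c = '\n'
    · subst hcn
      rw [h10, if_pos rfl]
      rw [ih (fun c hc => hs c (by simp [hc]))]
      simp [pvSplit, ← pvGlue_nil]
    · have hB : isB c = false := by
        cases hiB : isB c
        · rfl
        · rcases hOnly c hdc hiB with h | h
          · exact absurd h hcn
          · exact absurd h hno2
      rw [hB]
      simp only [Bool.false_eq_true, if_neg, not_false_eq_true]
      rw [ih (fun c hc => hs c (by simp [hc]))]
      simp only [pvSplit, if_neg hcn, List.reverse_cons]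
      rw [pvGlue_consHead]

theorem pvGlue_nil' (M : List (List Char)) : pvGlue [] M = M := by
  cases M <;> simp [pvGlue]

theorem pvSplitlines_eq (s : List Char) (hs : s.all pvDomChar) :
    PySem.Chars.splitlines s = pvSplit (pvNorm s) := by
  rw [PySem.Chars.splitlines]
  rw [pvGo_inv _ (by decide) (by decide) ?_ s ?_ [] []]
  · simp [pvGlue_nil']
  · intro c hd hB
    simp only [pvDomChar, Bool.or_eq_true, Bool.and_eq_true, decide_eq_true_eq, beq_iff_eq] at hd hB
    have h10 : ('\n').toNat = 10 := by decide
    have h13 : ('\r').toNat = 13 := by decide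
    have : c.toNat = 10 ∨ c.toNat = 13 := by omega
    rcases this with h | h
    · left; exact Char.ext (UInt32.toNat_inj.mp (by rw [show c.val.toNat = c.toNat from rfl, h]; decide))
    · right; exact Char.ext (UInt32.toNat_inj.mp (by rw [show c.val.toNat = c.toNat from rfl, h]; decide))
  · intro c hc
    simpa using List.all_eq_true.mp hs c hc

theorem pvSplit_nil_iff (n : List Char) : pvSplit n = [] ↔ n = [] := by
  cases n with
  | nil => simp [pvSplit]
  | cons c t =>
    simp only [pvSplit]
    constructor
    · intro h
      split at h
      · simp at h
      · cases hq : pvSplit t <;> simp [pvConsHead, hq] at h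
    · intro h; simp at h

theorem pvGetLast?_cons {α : Type} (c : α) (t : List α) (ht : t ≠ []) :
    (c :: t).getLast? = t.getLast? := by
  cases t with
  | nil => simp at ht
  | cons a b => simp [List.getLast?_cons_cons]

theorem pvSplit_no_nl (n : List Char) : ∀ l ∈ pvSplit n, '\n' ∉ l := by
  induction n with
  | nil => simp [pvSplit]
  | cons c t ih =>
    intro l hl
    simp only [pvSplit] at hl
    by_cases hc : c = '\n'
    · rw [if_pos hc] at hl
      rcases List.mem_cons.mp hl with hl | hl
      · subst hl; simp
      · exact ih l hl
    · rw [if_neg hc] at hl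
      cases hq : pvSplit t with
      | nil =>
        rw [hq] at hl
        simp only [pvConsHead, List.mem_cons, List.not_mem_nil, or_false] at hl
        subst hl
        simp [Ne.symm hc]
      | cons h0 t0 =>
        rw [hq] at hl
        simp only [pvConsHead, List.mem_cons] at hl
        rcases hl with hl | hl
        · subst hl
          intro hmem
          rcases List.mem_cons.mp hmem with h | h
          · exact hc h.symm
          · exact ih h0 (by rw [hq]; exact List.mem_cons_self ..) h
        · exact ih l (by rw [hq]; exact List.mem_cons_of_mem _ hl)

theorem pvEndsNl_cons (c : Char) (t : List Char) (ht : t ≠ []) :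
    pvEndsNl (c :: t) = pvEndsNl t := by
  simp [pvEndsNl, pvGetLast?_cons _ _ ht]

theorem pvUnsplit_split (n : List Char) : pvUnsplit (pvEndsNl n) (pvSplit n) = n := by
  induction n with
  | nil => simp [pvSplit, pvUnsplit]
  | cons c t ih =>
    by_cases hc : c = '\n'
    · subst hc
      cases ht : t with
      | nil => simp [pvSplit, pvUnsplit, pvUnsplitTail, pvEndsNl]
      | cons a b =>
        rw [← ht]
        have htne : t ≠ [] := by rw [ht]; simp
        rw [pvEndsNl_cons _ _ htne]
        simp only [pvSplit, pvUnsplit]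
        have hsp : pvSplit t ≠ [] := fun h => htne ((pvSplit_nil_iff t).mp h)
        cases hq : pvSplit t with
        | nil => exact absurd hq hsp
        | cons h0 t0 =>
          simp only [if_true, pvUnsplitTail, List.nil_append]
          rw [hq] at ih
          simp only [pvUnsplit] at ih
          rw [ih]
    · cases ht : t with
      | nil =>
        have he : pvEndsNl [c] = false := by simp [pvEndsNl, hc]
        simp [pvSplit, hc, pvConsHead, pvUnsplit, pvUnsplitTail, he]
      | cons a b =>
        rw [← ht]
        have htne : t ≠ [] := by rw [ht]; simp
        rw [pvEndsNl_cons _ _ htne]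
        simp only [pvSplit, if_neg hc]
        have hsp : pvSplit t ≠ [] := fun h => htne ((pvSplit_nil_iff t).mp h)
        cases hq : pvSplit t with
        | nil => exact absurd hq hsp
        | cons h0 t0 =>
          simp only [pvConsHead, pvUnsplit, List.cons_append]
          rw [hq] at ih
          simp only [pvUnsplit] at ih
          rw [ih]

theorem pvSplit_last (n : List Char) (h : pvEndsNl n = false) :
    pvSplit n = [] ∨ (pvSplit n).getLast? ≠ some [] := by
  induction n with
  | nil => left; simp [pvSplit]
  | cons c t ih =>
    right
    cases ht : t with
    | nil =>
      subst ht
      have hc : c ≠ '\n' := by simpa [pvEndsNl] using h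
      simp [pvSplit, hc, pvConsHead]
    | cons a b =>
      rw [← ht]
      have htne : t ≠ [] := by rw [ht]; simp
      rw [pvEndsNl_cons _ _ htne] at h
      have hsp : pvSplit t ≠ [] := fun hx => htne ((pvSplit_nil_iff t).mp hx)
      rcases ih h with h1 | h1
      · exact absurd h1 hsp
      · simp only [pvSplit]
        split
        · rw [pvGetLast?_cons _ _ hsp]
          exact h1
        · cases hq : pvSplit t with
          | nil => exact absurd hq hsp
          | cons h0 t0 =>
            rw [hq] at h1
            simp only [pvConsHead]
            cases t0 with
            | nil => simp_all
            | cons x y =>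
              rw [pvGetLast?_cons _ _ (by simp)]
              rw [pvGetLast?_cons _ _ (by simp)] at h1
              exact h1

theorem pvBSkip_nil (col : Nat) : pvBSkip col [] = [] := by
  cases col <;> simp [pvBSkip]

theorem pvBSkip_eq (col : Nat) (l v : List Char) (hl : '\n' ∉ l)
    (hv : v = [] ∨ v.head? = some '\n') :
    pvBSkip col (l ++ v) = l.drop col ++ v := by
  induction col generalizing l with
  | zero => simp [pvBSkip]
  | succ col ih =>
    cases l with
    | nil =>
      rcases hv with hv | hv
      · simp [hv, pvBSkip_nil]
      · cases v with
        | nil => simp at hv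
        | cons a w =>
          simp only [List.head?_cons, Option.some_inj] at hv
          subst hv
          simp [pvBSkip]
    | cons c t =>
      have hc : c ≠ '\n' := fun h => hl (h ▸ List.mem_cons_self ..)
      simp only [List.cons_append, pvBSkip, if_neg hc, List.drop_succ_cons]
      exact ih t (fun h => hl (List.mem_cons_of_mem _ h))

theorem pvBWalk_append (col : Nat) (l v : List Char) (hl : '\n' ∉ l) :
    pvBWalk col (l ++ v) = l ++ pvBWalk col v := by
  induction l with
  | nil => simp
  | cons c t ih =>
    have hc : c ≠ '\n' := fun h => hl (h ▸ List.mem_cons_self ..)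
    simp only [List.cons_append, pvBWalk, if_neg hc]
    rw [ih (fun h => hl (List.mem_cons_of_mem _ h))]

theorem pvUnsplitTail_head (e : Bool) (ls : List (List Char)) :
    pvUnsplitTail e ls = [] ∨ (pvUnsplitTail e ls).head? = some '\n' := by
  cases ls with
  | nil => cases e <;> simp [pvUnsplitTail]
  | cons l r => right; simp [pvUnsplitTail]

theorem pvBWalk_tail (col : Nat) (e : Bool) (ls : List (List Char))
    (h : ∀ l ∈ ls, '\n' ∉ l) :
    pvBWalk col (pvUnsplitTail e ls) = pvTailJoin col ls ++ (if e then ['\n'] else []) := by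
  induction ls with
  | nil =>
    cases e
    · simp [pvUnsplitTail, pvTailJoin, pvBWalk]
    · simp [pvUnsplitTail, pvTailJoin, pvBWalk, pvBSkip_nil]
  | cons l r ih =>
    have hl : '\n' ∉ l := h l (List.mem_cons_self ..)
    simp only [pvUnsplitTail, pvBWalk]
    rw [pvBSkip_eq col l (pvUnsplitTail e r) hl (pvUnsplitTail_head e r)]
    rw [pvBWalk_append col _ _ (fun hm => hl (List.mem_of_mem_drop hm))]
    rw [ih (fun x hx => h x (List.mem_cons_of_mem _ hx))]
    simp [pvTailJoin]

theorem pvBLead_blank (b v : List Char) (col : Nat) (hb : ∀ c ∈ b, c = ' ' ∨ c = '\t') :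
    pvBLead (b ++ v) col = pvBLead v (col + b.length) := by
  induction b generalizing col with
  | nil => simp
  | cons c t ih =>
    have hc := hb c (List.mem_cons_self ..)
    have hc' : c = ' ' ∨ c = '\t' ∨ c = '\n' := by tauto
    have hcn : c ≠ '\n' := by rcases hc with h | h <;> (subst h; decide)
    simp only [List.cons_append, pvBLead, if_pos hc', if_neg hcn]
    rw [ih (col + 1) (fun x hx => hb x (List.mem_cons_of_mem _ hx))]
    congr 1
    simp
    omega

theorem pvUnsplitTail_last_true (ls : List (List Char)) :
    (pvUnsplitTail true ls).getLast? = some '\n' := by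
  induction ls with
  | nil => simp [pvUnsplitTail]
  | cons l r ih =>
    have hne : pvUnsplitTail true r ≠ [] := by
      cases r <;> simp [pvUnsplitTail]
    simp only [pvUnsplitTail]
    rw [pvGetLast?_cons _ _ (by simp [hne]), List.getLast?_append_of_ne_nil _ hne]
    exact ih

theorem pvUnsplitTail_last_false (ls : List (List Char)) (hne : ls ≠ [])
    (hl : ls.getLast? ≠ some []) (hnl : ∀ l ∈ ls, '\n' ∉ l) :
    ∃ x, (pvUnsplitTail false ls).getLast? = some x ∧ x ≠ '\n' := by
  induction ls with
  | nil => simp at hne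
  | cons l r ih =>
    cases hr : r with
    | nil =>
      subst hr
      have hlne : l ≠ [] := by
        intro h; subst h; simp at hl
      have hmem : '\n' ∉ l := hnl l (List.mem_cons_self ..)
      refine ⟨l.getLast hlne, ?_, fun h => hmem (h ▸ List.getLast_mem hlne)⟩
      simp only [pvUnsplitTail, Bool.false_eq_true, if_neg, not_false_eq_true, List.append_nil]
      rw [pvGetLast?_cons _ _ hlne]
      exact List.getLast?_eq_some_getLast hlne
    | cons l1 r1 =>
      rw [← hr]
      have hrne : r ≠ [] := by rw [hr]; simp
      have hune : pvUnsplitTail false r ≠ [] := by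
        rw [hr]; simp [pvUnsplitTail]
      simp only [pvUnsplitTail]
      rw [pvGetLast?_cons _ _ (by simp [hune]), List.getLast?_append_of_ne_nil _ hune]
      apply ih hrne
      · rw [← pvGetLast?_cons l r hrne]; exact hl
      · exact fun x hx => hnl x (List.mem_cons_of_mem _ hx)

theorem pvJoinTail (col : Nat) (l0 : List Char) (ls : List (List Char)) :
    PySem.Chars.join ['\n'] ((l0 :: ls).map (fun l => l.drop col))
      = l0.drop col ++ pvTailJoin col ls := by
  induction ls generalizing l0 with
  | nil => simp [PySem.Chars.join_singleton, pvTailJoin]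
  | cons l r ih =>
    simp only [List.map_cons]
    rw [PySem.Chars.join_cons_cons]
    rw [show (List.map (fun l => l.drop col) r) = List.map (fun l => l.drop col) r from rfl]
    have := ih l
    simp only [List.map_cons] at this
    rw [this]
    simp [pvTailJoin]

theorem pvEndswith_eq (n : List Char) : PySem.Chars.endswith n ['\n'] = pvEndsNl n := by
  rw [PySem.Chars.endswith, pvEndsNl, ← List.head?_reverse, List.isSuffixOf]
  cases n.reverse with
  | nil => rfl
  | cons a w => simp [List.isPrefixOf, eq_comm]

theorem pvBCore_eq (ls : List (List Char)) (e : Bool)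
    (hnl : ∀ l ∈ ls, '\n' ∉ l)
    (hlast : e = false → ls = [] ∨ ls.getLast? ≠ some []) :
    pvBCore (pvUnsplit e ls) = pvLocJoin ls := by
  induction ls with
  | nil => simp [pvUnsplit, pvBCore, pvBLead, pvLocJoin]
  | cons l0 ls' ih =>
    simp only [pvUnsplit]
    by_cases hblank : pvStripL l0 = []
    · have hb : ∀ c ∈ l0, c = ' ' ∨ c = '\t' := by
        intro c hc
        have := List.dropWhile_eq_nil_iff.mp hblank c hc
        simpa using this
      have hLoc : pvLocJoin (l0 :: ls') = pvLocJoin ls' := by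
        simp [pvLocJoin, hblank]
      rw [hLoc]
      cases hls : ls' with
      | nil =>
        cases e
        · simp only [pvUnsplitTail, Bool.false_eq_true, if_neg, not_false_eq_true]
          simp only [pvBCore]
          rw [pvBLead_blank l0 [] 0 hb]
          simp [pvBLead, pvLocJoin]
        · simp only [pvUnsplitTail, if_true]
          simp only [pvBCore]
          rw [pvBLead_blank l0 ['\n'] 0 hb]
          simp [pvBLead, pvLocJoin]
      | cons l1 r1 =>
        rw [← hls]
        have hls' : ls' ≠ [] := by rw [hls]; simp
        have hm : pvUnsplitTail e ls' = '\n' :: pvUnsplit e ls' := by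
          rw [hls]; simp [pvUnsplitTail, pvUnsplit]
        rw [hm]
        set m := pvUnsplit e ls' with hmdef
        have hih : pvBCore m = pvLocJoin ls' := by
          apply ih (fun x hx => hnl x (List.mem_cons_of_mem _ hx))
          intro hef
          rcases hlast hef with h | h
          · simp at h
          · right
            rwa [pvGetLast?_cons l0 ls' hls'] at h
        have hlead : pvBLead (l0 ++ '\n' :: m) 0 = pvBLead m 0 := by
          rw [pvBLead_blank l0 ('\n' :: m) 0 hb]
          simp [pvBLead]
        simp only [pvBCore, hlead]
        rw [← hih]
        simp only [pvBCore]
        cases hL : pvBLead m 0 with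
        | mk rem col =>
          cases hrem : rem with
          | nil => simp
          | cons x xs =>
            have hmne : m ≠ [] := by
              intro h
              rw [h] at hL
              simp [pvBLead] at hL
              rw [hL.1] at hrem
              simp at hrem
            have hEnds : pvEndsNl (l0 ++ '\n' :: m) = pvEndsNl m := by
              rw [pvEndsNl, pvEndsNl, List.getLast?_append_of_ne_nil _ (by simp : ('\n' :: m) ≠ []), pvGetLast?_cons _ _ hmne]
            rw [hEnds]
    · cases hst : pvStripL l0 with
      | nil => exact absurd hst hblank
      | cons c0 t' =>
        have hsub : List.Sublist (c0 :: t') l0 := by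
          rw [← hst]; exact List.dropWhile_sublist _
        have hnl0 : '\n' ∉ l0 := hnl l0 (List.mem_cons_self ..)
        have hnlst : '\n' ∉ (c0 :: t') := fun h => hnl0 (hsub.mem h)
        have hc0 : (c0 == ' ' || c0 == '\t') = false := by
          have := List.head?_dropWhile_not (fun c => c == ' ' || c == '\t') l0
          rw [pvStripL] at hst
          rw [hst] at this
          simpa using this
        have hc0' : ¬(c0 = ' ' ∨ c0 = '\t' ∨ c0 = '\n') := by
          intro h
          rcases h with h | h | h
          · rw [h] at hc0; simp at hc0
          · rw [h] at hc0; simp at hc0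
          · exact hnlst (h ▸ List.mem_cons_self ..)
        set b := l0.takeWhile (fun c => c == ' ' || c == '\t') with hbdef
        have hb : ∀ c ∈ b, c = ' ' ∨ c = '\t' := by
          intro c hc
          have := List.mem_takeWhile_imp hc
          simpa using this
        have hsplit : l0 = b ++ (c0 :: t') := by
          rw [hbdef, ← hst, pvStripL, List.takeWhile_append_dropWhile]
        set u := pvUnsplitTail e ls' with hudef
        have hlead : pvBLead (l0 ++ u) 0 = (c0 :: (t' ++ u), b.length) := by
          rw [hsplit, List.append_assoc, pvBLead_blank b _ 0 hb]
          simp only [List.cons_append, pvBLead, if_neg hc0']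
          simp
        have hcol : l0.length - (pvStripL l0).length = b.length := by
          rw [hbdef, pvTakeWhile_len, pvStripL]
        simp only [pvBCore, hlead]
        have hwalk : pvBWalk b.length (c0 :: (t' ++ u))
            = (c0 :: t') ++ (pvTailJoin b.length ls' ++ (if e then ['\n'] else [])) := by
          rw [show c0 :: (t' ++ u) = (c0 :: t') ++ u from rfl]
          rw [pvBWalk_append _ _ _ hnlst]
          rw [hudef, pvBWalk_tail _ _ _ (fun x hx => hnl x (List.mem_cons_of_mem _ hx))]
        have hLoc : pvLocJoin (l0 :: ls')
            = some ((c0 :: t') ++ pvTailJoin b.length ls') := by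
          simp only [pvLocJoin, hst, ne_eq, reduceCtorEq, not_false_eq_true, if_pos]
          rw [show l0.length - (c0 :: t').length = b.length from by rw [← hst]; exact hcol]
          rw [pvJoinTail]
          rw [show l0.drop b.length = c0 :: t' from by
            rw [hbdef, pvDrop_takeWhile, ← pvStripL, hst]]
        rw [hLoc]
        cases e with
        | true =>
          have hEnds : pvEndsNl (l0 ++ u) = true := by
            have hune : u ≠ [] := by
              rw [hudef]; cases ls' <;> simp [pvUnsplitTail]
            rw [pvEndsNl, List.getLast?_append_of_ne_nil _ hune, hudef,
              pvUnsplitTail_last_true]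
            simp
          have hfin : (pvBWalk b.length (c0 :: (t' ++ u))).dropLast
              = (c0 :: t') ++ pvTailJoin b.length ls' := by
            rw [hwalk, if_pos rfl, ← List.append_assoc, List.dropLast_concat]
          rw [hEnds]
          simp [hfin]
        | false =>
          have hEnds : pvEndsNl (l0 ++ u) = false := by
            cases hls : ls' with
            | nil =>
              rw [hudef, hls]
              simp only [pvUnsplitTail, Bool.false_eq_true, if_neg, not_false_eq_true, List.append_nil]
              rw [hsplit, pvEndsNl, List.getLast?_append_of_ne_nil _ (by simp : (c0 :: t') ≠ [])]
              have hlne : (c0 :: t') ≠ [] := by simp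
              rw [List.getLast?_eq_some_getLast hlne]
              have : (c0 :: t').getLast hlne ≠ '\n' := fun h => hnlst (h ▸ List.getLast_mem hlne)
              simpa using this
            | cons l1 r1 =>
              have hls' : ls' ≠ [] := by rw [hls]; simp
              have hlast' : ls'.getLast? ≠ some [] := by
                rcases hlast rfl with h | h
                · simp at h
                · rwa [pvGetLast?_cons l0 ls' hls'] at h
              obtain ⟨x, hx, hxn⟩ := pvUnsplitTail_last_false ls' hls' hlast'
                (fun y hy => hnl y (List.mem_cons_of_mem _ hy))
              have hune : u ≠ [] := by
                rw [hudef, hls]; simp [pvUnsplitTail]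
              rw [pvEndsNl, List.getLast?_append_of_ne_nil _ hune, hudef, hx]
              simpa using hxn
          rw [hEnds]
          simp [hwalk]
-- ===== VERDICT (by name: the statement is the Claim_ definition above) =====
theorem format_description_text_spec : Claim_equal_format_description_text := by
  intro docstring hdom
  unfold Spec_format_description_text format_description_text format_description_text_alt
  cases docstring with
  | none => rfl
  | some d =>
    have hall : d.toList.all pvDomChar := by
      simpa [Dom_format_description_text, pvDomStr] using hdom
    set n := pvNorm d.toList with hn
    have h1 : ((PySem.Chars.splitlines d.toList).foldl pvAStep (none, 0)).1
        = pvLocJoin (pvSplit n) := by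
      rw [pvMain, pvSplitlines_eq _ hall]
    have h2 : pvBCore n = pvLocJoin (pvSplit n) := by
      have := pvBCore_eq (pvSplit n) (pvEndsNl n) (pvSplit_no_nl n) (pvSplit_last n)
      rwa [pvUnsplit_split] at this
    simp only [h1, ← h2, pvBCore, pvNormalize_eq, ← hn, pvEndswith_eq]
    cases hL : pvBLead n 0 with
    | mk rem col =>
      cases rem <;> simp
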